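-- pv_equiv track=rewrite | github.com/AttilaVM/learning | computer_science/rsa/blunt_rsa.py | get_intersection_of_factors
-- ===== SOURCE A (Python) =====
-- def is_prime(n:int) -> bool:
--     for i in range(2, n):
--         if n % i == 0:
--             return False
--     return True
--
-- def find_prime_up_to(n:int) -> list[int]:
--     primes = []
--     for i in range(2, n+1):
--         if is_prime(i):
--             primes.append(i)
--     return primes
--
-- def factor_tree(n:int, factors = []) -> list[int]:
--     possible_prime_factors = find_prime_up_to(n)
--
--     for p in possible_prime_factors:
--         m = n % p
--         if m != 0:
--             continue
--         d = n // p
--         factors.append(p)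
--
--         if d == 1:
--             return factors
--
--         if is_prime(d):
--             factors.append(d)
--             return factors
--
--         factors = factor_tree(d, factors)
--         return factors
--
--     return [] # in case there are zero prime factos for 1 it is true
--
-- def factorize(n):
--     return factor_tree(n, [])
--
-- def get_intersection_of_factors(a:int, b:int) -> int:
--     factors_of_a = factorize(a)
--     factors_of_b = factorize(b)
--
--     intersection_of_factors = []
--     for f in factors_of_a:
--         if f in factors_of_b:
--             intersection_of_factors.append(f)
--             factors_of_b.remove(f)
--
--     return intersection_of_factors
-- ===== SOURCE B (Python) =====
-- def _factorize(n):
--     """Prime factorization in ascending order by trial division up to sqrt(n)."""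
--     fs = []
--     d = 2
--     while d * d <= n:
--         if n % d == 0:
--             fs.append(d)
--             n //= d
--         else:
--             d += 1
--     if n > 1:
--         fs.append(n)
--     return fs
--
--
-- def get_intersection_of_factors(a, b):
--     fa = _factorize(a)
--     fb = _factorize(b)
--     out = []
--     i = j = 0
--     while i < len(fa) and j < len(fb):
--         if fa[i] == fb[j]:
--             out.append(fa[i])
--             i += 1
--             j += 1
--         elif fa[i] < fb[j]:
--             i += 1
--         else:
--             j += 1
--     return out
-- ===== Notes on version B (the rewrite author's own statement) =====
-- stated objective: faster
-- what changed: Replaces A's per-number prime sieve (is_prime by full trial division for every i up to n, recomputed at each recursion level of factor_tree) with direct trial division up to sqrt(n), and replaces the membership-plus-remove intersection with a linear two-pointer merge over the two sorted factor lists.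
import Mathlib
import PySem

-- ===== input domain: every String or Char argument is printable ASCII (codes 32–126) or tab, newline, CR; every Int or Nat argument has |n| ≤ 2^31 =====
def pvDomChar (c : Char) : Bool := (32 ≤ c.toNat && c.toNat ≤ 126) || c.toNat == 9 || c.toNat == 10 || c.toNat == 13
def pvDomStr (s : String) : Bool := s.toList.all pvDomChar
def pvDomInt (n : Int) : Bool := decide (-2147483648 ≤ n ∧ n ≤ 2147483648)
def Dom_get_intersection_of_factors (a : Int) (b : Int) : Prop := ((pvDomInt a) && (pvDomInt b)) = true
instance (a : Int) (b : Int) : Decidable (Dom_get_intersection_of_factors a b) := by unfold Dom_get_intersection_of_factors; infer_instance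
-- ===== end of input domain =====

-- B replaces A's per-number prime sieve (quadratic is_prime/find_prime_up_to at every
-- recursion level) by trial division up to sqrt(n) and a two-pointer merge of the two
-- sorted factor lists (objective: faster).

-- ===== PORT A =====
-- is_prime: 'for i in range(2, n): if n % i == 0: return False; return True'
def isPrimeA_loop (n : Int) (l : List Int) : Bool :=
  match l with
  | [] => true
  | i :: rest => if PySem.Int.mod n i == 0 then false else isPrimeA_loop n rest

def isPrimeA (n : Int) : Bool := isPrimeA_loop n (PySem.List.pyRange 2 n 1)

def findPrimeUpTo (n : Int) : List Int :=
  (PySem.List.pyRange 2 (n + 1) 1).foldl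
    (fun primes i => if isPrimeA i then primes ++ [i] else primes) []

-- factor_tree's 'for p in possible_prime_factors' loop; the recursive call
-- 'factor_tree(d, factors)' is guarded by fuel (a totality guard only: fuel = n.toNat
-- always suffices since the recursion argument d = n // p is smaller than n)
def factorTreeLoop (fuel : Nat) (ps : List Int) (n : Int) (factors : List Int) : List Int :=
  match ps with
  | [] => []
  | p :: rest =>
    let m := PySem.Int.mod n p
    if m != 0 then factorTreeLoop fuel rest n factors
    else
      let d := PySem.Int.floordiv n p
      let factors := factors ++ [p]
      if d == 1 then factors
      else if isPrimeA d then factors ++ [d]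
      else
        match fuel with
        | 0 => []
        | fuel' + 1 => factorTreeLoop fuel' (findPrimeUpTo d) d factors

-- factorize(n) = factor_tree(n, [])
def factorizeA (n : Int) : List Int := factorTreeLoop n.toNat (findPrimeUpTo n) n []

-- 'for f in factors_of_a: if f in factors_of_b: append f; factors_of_b.remove(f)'
def interLoopA (fa : List Int) (fb : List Int) (acc : List Int) : List Int :=
  match fa with
  | [] => acc
  | f :: rest =>
    if fb.contains f then
      interLoopA rest ((PySem.List.remove? fb f).getD fb) (acc ++ [f])
    else interLoopA rest fb acc

def get_intersection_of_factors (a : Int) (b : Int) : List Int :=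
  interLoopA (factorizeA a) (factorizeA b) []

-- ===== PORT B =====
-- B's 'while d * d <= n' trial-division loop; fuel is a totality guard only
-- (2*n.toNat + 2 always suffices: each step shrinks n or grows d ≤ n)
def factBLoop (fuel : Nat) (n : Int) (d : Int) (fs : List Int) : List Int :=
  match fuel with
  | 0 => fs
  | fuel' + 1 =>
    if d * d ≤ n then
      if PySem.Int.mod n d == 0 then factBLoop fuel' (PySem.Int.floordiv n d) d (fs ++ [d])
      else factBLoop fuel' n (d + 1) fs
    else if 1 < n then fs ++ [n] else fs

def factorizeB (n : Int) : List Int := factBLoop (2 * n.toNat + 2) n 2 []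

-- B's two-pointer merge over the two (sorted) factor lists
def mergeInter (fa : List Int) (fb : List Int) : List Int :=
  match fa, fb with
  | x :: fa', y :: fb' =>
    if x = y then x :: mergeInter fa' fb'
    else if x < y then mergeInter fa' (y :: fb')
    else mergeInter (x :: fa') fb'
  | _, _ => []
termination_by fa.length + fb.length

def get_intersection_of_factors_alt (a : Int) (b : Int) : List Int :=
  mergeInter (factorizeB a) (factorizeB b)

-- ===== PRECONDITION & SPEC =====
def Spec_get_intersection_of_factors (a : Int) (b : Int) (out : List Int) : Prop := out = get_intersection_of_factors_alt a b
instance (a : Int) (b : Int) (out : List Int) : Decidable (Spec_get_intersection_of_factors a b out) := by unfold Spec_get_intersection_of_factors; infer_instance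

-- ===== CLAIM (what is proved, stated in full; the proofs are below) =====
def Claim_equal_get_intersection_of_factors : Prop := ∀ (a : Int) (b : Int), Dom_get_intersection_of_factors a b → Spec_get_intersection_of_factors a b (get_intersection_of_factors a b)

-- ===== LEMMAS AND PROOFS =====

-- the common value of both factorizers: Nat.primeFactorsList, cast to Int
def pflZ (n : Int) : List Int := (Nat.primeFactorsList n.toNat).map (fun k : Nat => (k : Int))

theorem pflZ_of_nonpos (n : Int) (h : n ≤ 1) : pflZ n = [] := by
  have h01 : n.toNat = 0 ∨ n.toNat = 1 := by omega
  rcases h01 with h0 | h0 <;> simp [pflZ, h0]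

theorem pflZ_cons (n : Int) (h : 2 ≤ n) :
    pflZ n = ((n.toNat.minFac : Int)) :: pflZ ((n.toNat / n.toNat.minFac : Nat) : Int) := by
  obtain ⟨k, hk⟩ : ∃ k, n.toNat = k + 2 := ⟨n.toNat - 2, by omega⟩
  unfold pflZ
  rw [hk, Int.toNat_natCast]
  simp [Nat.primeFactorsList]

theorem pflZ_sorted (n : Int) : (pflZ n).Pairwise (· ≤ ·) := by
  have hs : (Nat.primeFactorsList n.toNat).Pairwise (· ≤ ·) :=
    List.sortedLE_iff_pairwise.mp (Nat.primeFactorsList_sorted n.toNat)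
  unfold pflZ
  exact (List.pairwise_map).mpr (hs.imp (fun {a b} hab => by exact_mod_cast hab))

theorem isPrimeA_loop_eq (n : Int) (l : List Int) :
    isPrimeA_loop n l = l.all (fun i => !(PySem.Int.mod n i == 0)) := by
  induction l with
  | nil => rfl
  | cons i rest ih =>
    rw [isPrimeA_loop, List.all_cons]
    by_cases hi : (PySem.Int.mod n i == 0) = true <;> simp [hi, ih]

theorem isPrimeA_iff (n : Int) (h : 2 ≤ n) : isPrimeA n = true ↔ Nat.Prime n.toNat := by
  have hcast : ((n.toNat : Nat) : Int) = n := Int.toNat_of_nonneg (by omega)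
  rw [isPrimeA, isPrimeA_loop_eq, List.all_eq_true]
  constructor
  · intro hall
    rw [Nat.prime_def_lt]
    refine ⟨by omega, fun m hm hdvd => ?_⟩
    by_contra hm1
    have hm0 : m ≠ 0 := by rintro rfl; rw [Nat.zero_dvd] at hdvd; omega
    have hmem : ((m : Nat) : Int) ∈ PySem.List.pyRange 2 n 1 := by
      rw [PySem.List.mem_pyRange_one]
      constructor
      · exact_mod_cast (by omega : 2 ≤ m)
      · calc ((m : Nat) : Int) < ((n.toNat : Nat) : Int) := by exact_mod_cast hm
          _ = n := hcast
    have hdz : ((m : Nat) : Int) ∣ n := by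
      rw [← hcast]; exact_mod_cast hdvd
    have := hall _ hmem
    rw [Bool.not_eq_eq_eq_not, Bool.not_true, beq_eq_false_iff_ne] at this
    exact this ((PySem.Int.mod_eq_zero_iff_dvd n _).mpr hdz)
  · intro hpr i hmem
    rw [PySem.List.mem_pyRange_one] at hmem
    rw [Bool.not_eq_eq_eq_not, Bool.not_true, beq_eq_false_iff_ne]
    intro hmod
    have hdvd : i ∣ n := (PySem.Int.mod_eq_zero_iff_dvd n i).mp hmod
    have hi0 : 0 ≤ i := by omega
    have hdN : i.toNat ∣ n.toNat := by
      rw [← Int.natCast_dvd_natCast, hcast, Int.toNat_of_nonneg hi0]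
      exact hdvd
    have hlt : i.toNat < n.toNat := by omega
    have := (Nat.prime_def_lt.mp hpr).2 i.toNat hlt hdN
    omega

theorem findPrimeUpTo_eq (n : Int) :
    findPrimeUpTo n = (PySem.List.pyRange 2 (n + 1) 1).filter isPrimeA := by
  rw [findPrimeUpTo, PySem.List.foldl_append_if_eq_filter, List.nil_append]

theorem find_pyRange (a b m : Int) (q : Int → Bool) (ham : a ≤ m) (hmb : m < b)
    (hq : q m = true) (hmin : ∀ i, a ≤ i → i < m → q i = false) :
    (PySem.List.pyRange a b 1).find? q = some m := by
  obtain ⟨k, hk⟩ : ∃ k, (m - a).toNat = k := ⟨_, rfl⟩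
  induction k generalizing a with
  | zero =>
    have ha : a = m := by omega
    subst ha
    rw [PySem.List.pyRange_one_cons (by omega), List.find?_cons_of_pos hq]
  | succ k ih =>
    have ham' : a < m := by omega
    rw [PySem.List.pyRange_one_cons (by omega), List.find?_cons_of_neg (by
      rw [hmin a le_rfl ham']; exact Bool.false_ne_true)]
    exact ih (a + 1) (by omega) (fun i h1 h2 => hmin i (by omega) h2) (by omega)

-- one step of factor_tree's loop, once the first dividing prime p is known
theorem ftl_find (fuel : Nat) (n : Int) (factors : List Int) :
    ∀ ps p, ps.find? (fun q => PySem.Int.mod n q == 0) = some p →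
    factorTreeLoop fuel ps n factors =
      (let d := PySem.Int.floordiv n p
       let factors := factors ++ [p]
       if d == 1 then factors
       else if isPrimeA d then factors ++ [d]
       else match fuel with
            | 0 => []
            | fuel' + 1 => factorTreeLoop fuel' (findPrimeUpTo d) d factors) := by
  intro ps
  induction ps with
  | nil => intro p hf; simp at hf
  | cons q rest ih =>
    intro p hf
    by_cases hq : (PySem.Int.mod n q == 0) = true
    · have h0 : PySem.Int.mod n q = 0 := beq_iff_eq.mp hq
      simp only [List.find?_cons, hq] at hf
      injection hf with hf
      subst hf
      rw [factorTreeLoop]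
      simp [h0]
    · simp only [List.find?_cons, hq] at hf
      rw [factorTreeLoop]
      have : (PySem.Int.mod n q != 0) = true := by
        simp only [bne_iff_ne, ne_eq]
        intro h0; exact hq (by simp [h0])
      simp only [this, if_pos]
      exact ih p hf

theorem factorTree_main :
    ∀ N : Nat, ∀ n : Int, n.toNat = N → 2 ≤ n → ∀ fuel : Nat, N ≤ fuel → ∀ factors,
      factorTreeLoop fuel (findPrimeUpTo n) n factors = factors ++ pflZ n := by
  intro N
  induction N using Nat.strong_induction_on with
  | _ N ih =>
  intro n hN h2 fuel hfuel factors
  have hcast : ((n.toNat : Nat) : Int) = n := Int.toNat_of_nonneg (by omega)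
  have hNne1 : n.toNat ≠ 1 := by omega
  have hPp : n.toNat.minFac.Prime := Nat.minFac_prime hNne1
  have hP2 : 2 ≤ n.toNat.minFac := hPp.two_le
  have hPdvd : n.toNat.minFac ∣ n.toNat := Nat.minFac_dvd _
  have hPle : n.toNat.minFac ≤ n.toNat := Nat.le_of_dvd (by omega) hPdvd
  have hPdvdZ : ((n.toNat.minFac : Nat) : Int) ∣ n := by
    rw [← hcast]; exact_mod_cast hPdvd
  have hfind : (findPrimeUpTo n).find? (fun p => PySem.Int.mod n p == 0)
      = some ((n.toNat.minFac : Nat) : Int) := by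
    rw [findPrimeUpTo_eq, List.find?_filter]
    apply find_pyRange
    · exact_mod_cast hP2
    · have : ((n.toNat.minFac : Nat) : Int) ≤ ((n.toNat : Nat) : Int) := by exact_mod_cast hPle
      omega
    · rw [decide_eq_true_iff]
      refine ⟨(isPrimeA_iff _ (by exact_mod_cast hP2)).mpr (by rwa [Int.toNat_natCast]), ?_⟩
      exact beq_iff_eq.mpr ((PySem.Int.mod_eq_zero_iff_dvd n _).mpr hPdvdZ)
    · intro i h2i him
      rw [decide_eq_false_iff_not]
      rintro ⟨_hpr, hmod⟩
      have hdvd : i ∣ n := (PySem.Int.mod_eq_zero_iff_dvd n i).mp (beq_iff_eq.mp hmod)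
      have hdN : i.toNat ∣ n.toNat := by
        rw [← Int.natCast_dvd_natCast, hcast, Int.toNat_of_nonneg (by omega)]
        exact hdvd
      have := Nat.minFac_le_of_dvd (by omega) hdN
      omega
  rw [ftl_find fuel n factors _ _ hfind]
  have hflo : PySem.Int.floordiv n ((n.toNat.minFac : Nat) : Int)
      = ((n.toNat / n.toNat.minFac : Nat) : Int) := by
    rw [← hcast]; exact_mod_cast PySem.Int.floordiv_natCast n.toNat n.toNat.minFac
  have hDpos : 1 ≤ n.toNat / n.toNat.minFac := (Nat.one_le_div_iff (by omega)).mpr hPle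
  rw [pflZ_cons n h2]
  simp only [hflo]
  by_cases hD1 : n.toNat / n.toNat.minFac = 1
  · rw [hD1]
    simp only [Nat.cast_one, beq_self_eq_true, if_pos]
    rw [pflZ_of_nonpos _ (by norm_num)]
  · have hD2 : 2 ≤ n.toNat / n.toNat.minFac := by omega
    have hne1 : (((n.toNat / n.toNat.minFac : Nat) : Int) == 1) = false := by
      rw [beq_eq_false_iff_ne]
      exact_mod_cast (by omega : (n.toNat / n.toNat.minFac : Nat) ≠ 1)
    rw [hne1]
    simp only [Bool.false_eq_true, if_false]
    have hD2Z : (2 : Int) ≤ ((n.toNat / n.toNat.minFac : Nat) : Int) := by exact_mod_cast hD2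
    have htN : (((n.toNat / n.toNat.minFac : Nat) : Int)).toNat = n.toNat / n.toNat.minFac :=
      Int.toNat_natCast _
    by_cases hpr : isPrimeA (((n.toNat / n.toNat.minFac : Nat) : Int)) = true
    · rw [if_pos hpr]
      have hprime : (n.toNat / n.toNat.minFac).Prime := by
        have := (isPrimeA_iff _ hD2Z).mp hpr
        rwa [htN] at this
      rw [show pflZ (((n.toNat / n.toNat.minFac : Nat) : Int))
          = [((n.toNat / n.toNat.minFac : Nat) : Int)] by
        unfold pflZ
        rw [htN, Nat.primeFactorsList_prime hprime]
        simp]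
      simp [List.append_assoc]
    · rw [if_neg hpr]
      have hDlt : n.toNat / n.toNat.minFac < N := by
        rw [← hN]
        exact Nat.div_lt_self (by omega) (by omega)
      obtain ⟨fuel', rfl⟩ : ∃ f, fuel = f + 1 := ⟨fuel - 1, by omega⟩
      show factorTreeLoop fuel' (findPrimeUpTo ((n.toNat / n.toNat.minFac : Nat) : Int))
          ((n.toNat / n.toNat.minFac : Nat) : Int)
          (factors ++ [((n.toNat.minFac : Nat) : Int)])
        = factors ++ ((n.toNat.minFac : Nat) : Int) :: pflZ ((n.toNat / n.toNat.minFac : Nat) : Int)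
      rw [ih _ hDlt _ htN hD2Z fuel' (by omega) (factors ++ [((n.toNat.minFac : Nat) : Int)])]
      simp [List.append_assoc]

theorem factorizeA_eq (n : Int) : factorizeA n = pflZ n := by
  by_cases h2 : 2 ≤ n
  · exact factorTree_main n.toNat n rfl h2 n.toNat le_rfl []
  · have hle : n ≤ 1 := by omega
    have hr : PySem.List.pyRange 2 (n + 1) 1 = [] := PySem.List.pyRange_one_eq_nil (by omega)
    rw [factorizeA, findPrimeUpTo, hr, pflZ_of_nonpos n hle]
    simp [factorTreeLoop]

theorem factB_main :
    ∀ fuel : Nat, ∀ n d : Int, 2 ≤ d → (∀ k : Int, 2 ≤ k → k < d → ¬ k ∣ n) →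
      n.toNat + (n.toNat + 2 - d.toNat) ≤ fuel → ∀ fs,
      factBLoop fuel n d fs = fs ++ pflZ n := by
  intro fuel
  induction fuel with
  | zero =>
    intro n d hd2 hinv hm fs
    have hD2 : 2 ≤ d.toNat := by omega
    have hN0 : n.toNat = 0 := by omega
    rw [factBLoop, pflZ_of_nonpos n (by omega), List.append_nil]
  | succ fuel' ih =>
    intro n d hd2 hinv hm fs
    have hd0 : 0 ≤ d := by omega
    have hdD : ((d.toNat : Nat) : Int) = d := Int.toNat_of_nonneg hd0
    rw [factBLoop]
    by_cases hdd : d * d ≤ n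
    · have hn4 : (4 : Int) ≤ n := by nlinarith
      have hcast : ((n.toNat : Nat) : Int) = n := Int.toNat_of_nonneg (by omega)
      rw [if_pos hdd]
      by_cases hmod : (PySem.Int.mod n d == 0) = true
      · rw [if_pos hmod]
        have hdvd : d ∣ n := (PySem.Int.mod_eq_zero_iff_dvd n d).mp (beq_iff_eq.mp hmod)
        have hDdvd : d.toNat ∣ n.toNat := by
          rw [← Int.natCast_dvd_natCast, hcast, hdD]; exact hdvd
        have hmf_le : n.toNat.minFac ≤ d.toNat := Nat.minFac_le_of_dvd (by omega) hDdvd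
        have hmf_ge : d.toNat ≤ n.toNat.minFac := by
          by_contra hlt
          rw [not_le] at hlt
          have hp := Nat.minFac_prime (show n.toNat ≠ 1 by omega)
          have hmfd : ((n.toNat.minFac : Nat) : Int) ∣ n := by
            rw [← hcast]; exact_mod_cast Nat.minFac_dvd n.toNat
          exact hinv _ (by exact_mod_cast hp.two_le)
            (by rw [← hdD]; exact_mod_cast hlt) hmfd
        have hdmf : d.toNat = n.toNat.minFac := le_antisymm hmf_ge hmf_le
        have hflo : PySem.Int.floordiv n d = ((n.toNat / d.toNat : Nat) : Int) := by
          rw [← hcast, ← hdD]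
          exact_mod_cast PySem.Int.floordiv_natCast n.toNat d.toNat
        have hNdiv_lt : n.toNat / d.toNat < n.toNat := Nat.div_lt_self (by omega) (by omega)
        have hdvd' : ∀ k : Int, 2 ≤ k → k < d → ¬ k ∣ PySem.Int.floordiv n d := by
          intro k hk2 hkd hkdvd
          apply hinv k hk2 hkd
          have hquot : PySem.Int.floordiv n d ∣ n := by
            rw [hflo, ← hcast]
            exact_mod_cast Nat.div_dvd_of_dvd hDdvd
          exact hkdvd.trans hquot
        rw [ih _ d hd2 hdvd' (by
          rw [hflo, Int.toNat_natCast]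
          omega) (fs ++ [d])]
        rw [pflZ_cons n (by omega), ← hdmf, hdD, hflo, List.append_assoc]
        rfl
      · rw [if_neg hmod]
        have hndvd : ¬ d ∣ n := fun hdvd =>
          hmod (beq_iff_eq.mpr ((PySem.Int.mod_eq_zero_iff_dvd n d).mpr hdvd))
        have hinv' : ∀ k : Int, 2 ≤ k → k < d + 1 → ¬ k ∣ n := by
          intro k hk2 hkd
          by_cases hkeq : k = d
          · subst hkeq; exact hndvd
          · exact hinv k hk2 (by omega)
        have hdn : 2 * d ≤ n := by nlinarith
        have hdN : d.toNat < n.toNat := by omega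
        exact ih n (d + 1) (by omega) hinv' (by omega) fs
    · rw [if_neg hdd]
      by_cases h1n : 1 < n
      · rw [if_pos h1n]
        have hcast : ((n.toNat : Nat) : Int) = n := Int.toNat_of_nonneg (by omega)
        have hprime : n.toNat.Prime := by
          by_contra hnp
          have hsq := Nat.minFac_sq_le_self (show 0 < n.toNat by omega) hnp
          have hp := Nat.minFac_prime (show n.toNat ≠ 1 by omega)
          have hmfd : ((n.toNat.minFac : Nat) : Int) ∣ n := by
            rw [← hcast]; exact_mod_cast Nat.minFac_dvd n.toNat
          have hmf_ge : d ≤ ((n.toNat.minFac : Nat) : Int) := by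
            by_contra hlt
            rw [not_le] at hlt
            exact hinv _ (by exact_mod_cast hp.two_le) hlt hmfd
          have hsqZ : ((n.toNat.minFac : Nat) : Int) * ((n.toNat.minFac : Nat) : Int) ≤ n := by
            calc ((n.toNat.minFac : Nat) : Int) * ((n.toNat.minFac : Nat) : Int)
                = (((n.toNat.minFac * n.toNat.minFac : Nat)) : Int) := by push_cast; ring
              _ ≤ ((n.toNat : Nat) : Int) := by exact_mod_cast (by nlinarith [hsq] : n.toNat.minFac * n.toNat.minFac ≤ n.toNat)
              _ = n := hcast
          have : d * d ≤ n := by nlinarith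
          exact hdd this
        rw [show pflZ n = [n] by
          unfold pflZ
          rw [Nat.primeFactorsList_prime hprime]
          simp [hcast]]
      · rw [if_neg h1n, pflZ_of_nonpos n (by omega), List.append_nil]

theorem factorizeB_eq (n : Int) : factorizeB n = pflZ n := by
  apply factB_main (2 * n.toNat + 2) n 2 (by omega) (fun k hk2 hkd => by omega) (by
    have : (2 : Int).toNat = 2 := rfl
    omega)

theorem interLoopA_nil_fb (fa acc : List Int) : interLoopA fa [] acc = acc := by
  induction fa generalizing acc with
  | nil => rfl
  | cons f rest ih => rw [interLoopA]; simp [ih]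

theorem interLoopA_drop_head (fa : List Int) (y : Int) (fb acc : List Int) (h : y ∉ fa) :
    interLoopA fa (y :: fb) acc = interLoopA fa fb acc := by
  induction fa generalizing fb acc with
  | nil => rfl
  | cons f rest ih =>
    have hfy : f ≠ y := fun he => h (he ▸ List.mem_cons_self ..)
    have hyrest : y ∉ rest := fun hm => h (List.mem_cons_of_mem _ hm)
    rw [interLoopA, interLoopA]
    have hyf : y ≠ f := fun he => hfy he.symm
    have hc : (y :: fb).contains f = fb.contains f := by
      simp [hfy]
    rw [hc]
    by_cases hmem : fb.contains f = true
    · rw [if_pos hmem, if_pos hmem]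
      have hfmem : f ∈ fb := List.contains_iff_mem.mp hmem
      obtain ⟨l, hl⟩ : ∃ l, PySem.List.remove? fb f = some l := by
        rcases hrem : PySem.List.remove? fb f with _ | l
        · rw [PySem.List.remove?_eq_none_iff] at hrem; exact absurd hfmem hrem
        · exact ⟨l, rfl⟩
      have hrm : PySem.List.remove? (y :: fb) f = some (y :: l) := by
        rw [PySem.List.remove?_cons_of_ne fb hyf, hl, Option.map_some]
      rw [hrm, hl]
      simp only [Option.getD_some]
      exact ih l (acc ++ [f]) hyrest
    · rw [if_neg hmem, if_neg hmem]
      exact ih fb acc hyrest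

theorem interLoopA_eq_mergeInter : ∀ fa fb : List Int,
    fa.Pairwise (· ≤ ·) → fb.Pairwise (· ≤ ·) → ∀ acc,
    interLoopA fa fb acc = acc ++ mergeInter fa fb := by
  intro fa fb
  fun_induction mergeInter fa fb with
  | case1 fa' y fb' ih =>
    intro ha hb acc
    rw [interLoopA]
    have hc : (y :: fb').contains y = true := by simp
    rw [if_pos hc, PySem.List.remove?_cons_self]
    simp only [Option.getD_some]
    rw [ih (List.Pairwise.sublist (List.sublist_cons_self _ _) ha)
      (List.Pairwise.sublist (List.sublist_cons_self _ _) hb) (acc ++ [y])]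
    rw [mergeInter.eq_def]
    simp [List.append_assoc]
  | case2 x fa' y fb' hne hlt ih =>
    intro ha hb acc
    have hnotmem : x ∉ y :: fb' := by
      intro hmem
      rcases List.mem_cons.mp hmem with h | h
      · exact hne h
      · have := (List.pairwise_cons.mp hb).1 x h
        omega
    have hc : (y :: fb').contains x = false := by
      rw [← Bool.not_eq_true, List.contains_iff_mem]; exact hnotmem
    rw [interLoopA, hc]
    simp only [Bool.false_eq_true, if_false]
    rw [ih (List.Pairwise.sublist (List.sublist_cons_self _ _) ha) hb acc]
  | case3 x fa' y fb' hne hnlt ih =>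
    intro ha hb acc
    have hyx : y < x := by
      rcases lt_trichotomy x y with h | h | h
      · exact absurd h hnlt
      · exact absurd h hne
      · exact h
    have hynot : y ∉ x :: fa' := by
      intro hmem
      rcases List.mem_cons.mp hmem with h | h
      · omega
      · have := (List.pairwise_cons.mp ha).1 y h
        omega
    rw [interLoopA_drop_head _ _ _ _ hynot]
    rw [ih ha (List.Pairwise.sublist (List.sublist_cons_self _ _) hb) acc]
  | case4 fa fb hemp =>
    intro ha hb acc
    rcases fa with _ | ⟨f, rest⟩
    · simp [interLoopA]
    · rcases fb with _ | ⟨g, gs⟩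
      · rw [interLoopA_nil_fb]
        simp
      · exact absurd (hemp f rest g gs rfl rfl) not_false

-- ===== VERDICT (by name: the statement is the Claim_ definition above) =====
theorem get_intersection_of_factors_spec : Claim_equal_get_intersection_of_factors := by
  intro a b _
  unfold Spec_get_intersection_of_factors get_intersection_of_factors get_intersection_of_factors_alt
  rw [factorizeA_eq, factorizeA_eq, factorizeB_eq, factorizeB_eq,
    interLoopA_eq_mergeInter _ _ (pflZ_sorted a) (pflZ_sorted b), List.nil_append]
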